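-- pv_equiv track=rewrite | github.com/aiishii/shinra_jp_bert | run_squad_for_shinra.py | get_chunks
-- ===== SOURCE A (Python) =====
-- def get_chunks(seq, begin="B", default=["O"]):
-- 	"""Given a sequence of tags, group entities and their position
-- 	Args:
-- 		seq: ["O", "O", "B", "I", ...] sequence of labels
--
-- 	Returns:
-- 		list of (chunk_start, chunk_end)
-- 	"""
-- 	# default = "O"
-- 	chunks = []
-- 	chunk_start = None
-- 	for i, tok in enumerate(seq):
-- 		if (tok in default or tok == begin) and not chunk_start is None:
-- 			chunk = (chunk_start, i)
-- 			chunks.append(chunk)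
-- 			chunk_start = None
-- 		if tok == begin:
-- 			chunk_start = i
--
-- 	if chunk_start is not None:
-- 		chunk = (chunk_start, len(seq))
-- 		chunks.append(chunk)
--
-- 	return chunks
-- ===== SOURCE B (Python) =====
-- def get_chunks(seq, begin="B", default=["O"]):
--     starts = [i for i, tok in enumerate(seq) if tok == begin]
--     bounds = [i for i, tok in enumerate(seq) if tok in default or tok == begin]
--     return [(s, next((e for e in bounds if e > s), len(seq))) for s in starts]
-- ===== Notes on version B (the rewrite author's own statement) =====
-- stated objective: alternative
-- what changed: Replaces A's single-pass state machine (pending chunk_start closed on the next boundary) by an index-based two-phase computation: collect all begin indices and all boundary indices first, then pair each start with the first boundary index after it (len(seq) if none).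
import Mathlib
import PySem

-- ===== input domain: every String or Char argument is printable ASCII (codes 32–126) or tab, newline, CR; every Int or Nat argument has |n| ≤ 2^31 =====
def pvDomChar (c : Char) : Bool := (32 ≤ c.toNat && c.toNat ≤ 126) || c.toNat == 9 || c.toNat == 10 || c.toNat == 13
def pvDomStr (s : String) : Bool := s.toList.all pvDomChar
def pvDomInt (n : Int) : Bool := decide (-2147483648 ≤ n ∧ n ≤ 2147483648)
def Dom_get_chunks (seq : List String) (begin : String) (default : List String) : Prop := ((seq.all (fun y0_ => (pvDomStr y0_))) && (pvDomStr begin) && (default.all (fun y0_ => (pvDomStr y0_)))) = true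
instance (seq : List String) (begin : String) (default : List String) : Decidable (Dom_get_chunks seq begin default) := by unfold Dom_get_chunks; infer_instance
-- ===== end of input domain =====

-- B replaces A's single-pass pending-start state machine by a two-phase index computation
-- (collect begin indices and boundary indices, then pair each start with the first later boundary);
-- objective: alternative decomposition of the same O(n)-ish task.


-- ===== PORT A =====
-- A's for-loop over enumerate(seq), state = (chunks, chunk_start : Option Int)
def get_chunks_loop (begin : String) (default : List String) :
    List (Int × String) → List (Int × Int) → Option Int → List (Int × Int) × Option Int
  | [], chunks, cs => (chunks, cs)
  | (i, tok) :: rest, chunks, cs =>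
    let st : List (Int × Int) × Option Int :=
      match cs with
      | some c =>
        if default.contains tok || tok == begin then (chunks ++ [(c, i)], none) else (chunks, cs)
      | none => (chunks, cs)
    get_chunks_loop begin default rest st.1 (if tok == begin then some i else st.2)

def get_chunks (seq : List String) (begin : String) (default : List String) : List (Int × Int) :=
  match get_chunks_loop begin default (PySem.List.enumerate seq 0) [] none with
  | (chunks, some c) => chunks ++ [(c, (seq.length : Int))]
  | (chunks, none) => chunks

-- ===== PORT B =====
def get_chunks_alt (seq : List String) (begin : String) (default : List String) : List (Int × Int) :=
  let starts := (PySem.List.enumerate seq 0).filterMap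
    (fun p => if p.2 == begin then some p.1 else none)
  let bounds := (PySem.List.enumerate seq 0).filterMap
    (fun p => if default.contains p.2 || p.2 == begin then some p.1 else none)
  starts.map (fun s => (s, ((bounds.find? (fun e => decide (s < e))).getD (seq.length : Int))))

-- ===== PRECONDITION & SPEC =====
def Spec_get_chunks (seq : List String) (begin : String) (default : List String) (out : List (Int × Int)) : Prop := out = get_chunks_alt seq begin default
instance (seq : List String) (begin : String) (default : List String) (out : List (Int × Int)) : Decidable (Spec_get_chunks seq begin default out) := by unfold Spec_get_chunks; infer_instance

-- ===== CLAIM (what is proved, stated in full; the proofs are below) =====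
def Claim_equal_get_chunks : Prop := ∀ (seq : List String) (begin : String) (default : List String), Dom_get_chunks seq begin default → Spec_get_chunks seq begin default (get_chunks seq begin default)

-- ===== LEMMAS AND PROOFS =====

-- first boundary index in the pair list, else L
def pvFb (begin : String) (default : List String) (L : Int) : List (Int × String) → Int
  | [] => L
  | (i, tok) :: rest => if default.contains tok || tok == begin then i else pvFb begin default L rest

-- closed form of A's loop result (after the final flush)
def pvAltOn (begin : String) (default : List String) (L : Int) : List (Int × String) → List (Int × Int)
  | [] => []
  | (i, tok) :: rest =>
    if tok == begin then (i, pvFb begin default L rest) :: pvAltOn begin default L rest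
    else pvAltOn begin default L rest

def pvFin (L : Int) (p : List (Int × Int) × Option Int) : List (Int × Int) :=
  match p with
  | (chunks, some c) => chunks ++ [(c, L)]
  | (chunks, none) => chunks

def pvStarts (begin : String) (l : List (Int × String)) : List Int :=
  l.filterMap (fun p => if p.2 == begin then some p.1 else none)

def pvBounds (begin : String) (default : List String) (l : List (Int × String)) : List Int :=
  l.filterMap (fun p => if default.contains p.2 || p.2 == begin then some p.1 else none)

lemma loop_spec (begin : String) (default : List String) (L : Int) :
    ∀ (ps : List (Int × String)) (chunks : List (Int × Int)) (cs : Option Int),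
    pvFin L (get_chunks_loop begin default ps chunks cs) =
      chunks ++ (match cs with
        | some c => (c, pvFb begin default L ps) :: pvAltOn begin default L ps
        | none => pvAltOn begin default L ps) := by
  intro ps
  induction ps with
  | nil =>
    intro chunks cs
    cases cs <;> simp [get_chunks_loop, pvFin, pvAltOn, pvFb]
  | cons p rest ih =>
    obtain ⟨i, tok⟩ := p
    intro chunks cs
    by_cases hc : tok ∈ default <;> by_cases hb : tok = begin <;>
      cases cs <;>
      simp [get_chunks_loop, hc, hb, ih, pvAltOn, pvFb]

lemma get_chunks_eq_altOn (seq : List String) (begin : String) (default : List String) :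
    get_chunks seq begin default =
      pvAltOn begin default (seq.length : Int) (PySem.List.enumerate seq 0) := by
  have h := loop_spec begin default (seq.length : Int) (PySem.List.enumerate seq 0) [] none
  unfold get_chunks
  cases hres : get_chunks_loop begin default (PySem.List.enumerate seq 0) [] none with
  | mk chunks cs =>
    cases cs <;> simpa [pvFin, hres] using h

lemma mem_bounds_ge (begin : String) (default : List String) :
    ∀ (seq : List String) (k : Int) (e : Int),
    e ∈ pvBounds begin default (PySem.List.enumerate seq k) → k ≤ e := by
  intro seq k e he
  rcases List.mem_filterMap.mp he with ⟨⟨j, tok⟩, hmem, hval⟩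
  rcases (PySem.List.mem_enumerate_iff _ _ _).mp hmem with ⟨m, hm, heq⟩
  simp at heq
  by_cases hc : tok ∈ default <;> by_cases hb : tok = begin <;> simp [hc, hb] at hval <;> omega

lemma fb_eq_head (begin : String) (default : List String) (L : Int) :
    ∀ (l : List (Int × String)),
    pvFb begin default L l = ((pvBounds begin default l).head?).getD L := by
  intro l
  induction l with
  | nil => simp [pvFb, pvBounds]
  | cons p rest ih =>
    obtain ⟨i, tok⟩ := p
    by_cases hc : tok ∈ default <;> by_cases hb : tok = begin <;>
      simp [pvFb, pvBounds, hc, hb, ih]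

lemma find?_all_gt (s : Int) :
    ∀ (l : List Int), (∀ e ∈ l, s < e) →
    l.find? (fun e => decide (s < e)) = l.head? := by
  intro l hl
  cases l with
  | nil => rfl
  | cons e rest =>
    have : s < e := hl e (List.mem_cons_self)
    simp [this]

lemma alt_main (begin : String) (default : List String) (L : Int) :
    ∀ (seq : List String) (k : Int),
    pvAltOn begin default L (PySem.List.enumerate seq k) =
      (pvStarts begin (PySem.List.enumerate seq k)).map
        (fun s => (s, ((pvBounds begin default (PySem.List.enumerate seq k)).find?
          (fun e => decide (s < e))).getD L)) := by
  intro seq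
  induction seq with
  | nil => intro k; simp [PySem.List.enumerate_nil, pvAltOn, pvStarts, pvBounds]
  | cons tok rest ih =>
    intro k
    rw [PySem.List.enumerate_cons]
    have hstart_ge : ∀ s ∈ pvStarts begin (PySem.List.enumerate rest (k + 1)), k + 1 ≤ s := by
      intro s hs
      rcases List.mem_filterMap.mp hs with ⟨⟨j, t⟩, hmem, hval⟩
      rcases (PySem.List.mem_enumerate_iff _ _ _).mp hmem with ⟨m, hm, heq⟩
      simp at heq
      by_cases hb : t = begin <;> simp [hb] at hval
      omega
    have hbound_gt : ∀ e ∈ pvBounds begin default (PySem.List.enumerate rest (k + 1)), k < e := by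
      intro e he
      have := mem_bounds_ge begin default rest (k + 1) e he
      omega
    by_cases hb : tok = begin
    · -- tok is a start (and hence a boundary): both lists gain k at the front
      have hstarts : pvStarts begin ((k, tok) :: PySem.List.enumerate rest (k + 1)) =
          k :: pvStarts begin (PySem.List.enumerate rest (k + 1)) := by
        simp [pvStarts, hb]
      have hbounds : pvBounds begin default ((k, tok) :: PySem.List.enumerate rest (k + 1)) =
          k :: pvBounds begin default (PySem.List.enumerate rest (k + 1)) := by
        simp [pvBounds, hb]
      rw [hstarts, hbounds]
      simp only [pvAltOn, hb, BEq.rfl, if_pos, List.map_cons]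
      refine congrArg₂ List.cons ?_ ?_
      · rw [fb_eq_head, List.find?_cons_of_neg (by simp)]
        rw [find?_all_gt k _ hbound_gt]
      · rw [ih (k + 1)]
        apply List.map_congr_left
        intro s hs
        have hks : k + 1 ≤ s := hstart_ge s hs
        rw [List.find?_cons_of_neg (by simp; omega)]
    · by_cases hc : tok ∈ default
      · -- boundary but not a start: bounds gains k, starts unchanged
        have hstarts : pvStarts begin ((k, tok) :: PySem.List.enumerate rest (k + 1)) =
            pvStarts begin (PySem.List.enumerate rest (k + 1)) := by
          simp [pvStarts, hb]
        have hbounds : pvBounds begin default ((k, tok) :: PySem.List.enumerate rest (k + 1)) =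
            k :: pvBounds begin default (PySem.List.enumerate rest (k + 1)) := by
          simp [pvBounds, hc]
        rw [hstarts, hbounds]
        simp only [pvAltOn]
        rw [if_neg (by simp [hb]), ih (k + 1)]
        apply List.map_congr_left
        intro s hs
        have hks : k + 1 ≤ s := hstart_ge s hs
        rw [List.find?_cons_of_neg (by simp; omega)]
      · -- neither: both lists unchanged
        have hstarts : pvStarts begin ((k, tok) :: PySem.List.enumerate rest (k + 1)) =
            pvStarts begin (PySem.List.enumerate rest (k + 1)) := by
          simp [pvStarts, hb]
        have hbounds : pvBounds begin default ((k, tok) :: PySem.List.enumerate rest (k + 1)) =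
            pvBounds begin default (PySem.List.enumerate rest (k + 1)) := by
          simp [pvBounds, hc, hb]
        rw [hstarts, hbounds]
        simp only [pvAltOn]
        rw [if_neg (by simp [hb]), ih (k + 1)]

-- ===== VERDICT (by name: the statement is the Claim_ definition above) =====
theorem get_chunks_spec : Claim_equal_get_chunks := by
  intro seq begin default _
  unfold Spec_get_chunks get_chunks_alt
  rw [get_chunks_eq_altOn, alt_main]
  rfl
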